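-- pv_equiv track=rewrite | github.com/valeryvpetrov-dev/android-apps-similarity | script/noise_integration.py | _looks_like_adware_library
-- ===== SOURCE A (Python) =====
-- from typing import Any, Dict, List, Optional, Tuple
--
-- _ADWARE_LIBRARY_PREFIXES = (
--     "admob",
--     "facebook_ads",
--     "com.google.android.gms.ads",
--     "com.google.ads",
--     "com.facebook.ads",
--     "com.unity3d.ads",
--     "com.applovin",
--     "com.mopub",
--     "com.ironsource",
--     "com.vungle",
--     "com.chartboost",
--     "com.inmobi",
--     "com.adcolony",
--     "com.tapjoy",
--     "com.startapp",
--     "com.bytedance.sdk.openadsdk",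
--     "com.smaato",
--     "net.pubnative",
-- )
--
-- def _looks_like_adware_library(raw_name: Any) -> bool:
--     """Return True when a LIBLOOM library name matches known ad SDKs."""
--     if not raw_name:
--         return False
--
--     name = str(raw_name).strip().lower()
--     if not name:
--         return False
--
--     return any(
--         name == prefix or name.startswith(prefix + ".")
--         for prefix in _ADWARE_LIBRARY_PREFIXES
--     )
-- ===== SOURCE B (Python) =====
-- _ADWARE_LIBRARY_PREFIX_SET = frozenset((
--     "admob",
--     "facebook_ads",
--     "com.google.android.gms.ads",
--     "com.google.ads",
--     "com.facebook.ads",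
--     "com.unity3d.ads",
--     "com.applovin",
--     "com.mopub",
--     "com.ironsource",
--     "com.vungle",
--     "com.chartboost",
--     "com.inmobi",
--     "com.adcolony",
--     "com.tapjoy",
--     "com.startapp",
--     "com.bytedance.sdk.openadsdk",
--     "com.smaato",
--     "net.pubnative",
-- ))
--
--
-- def _looks_like_adware_library(raw_name) -> bool:
--     """Return True when a LIBLOOM library name matches known ad SDKs."""
--     if not raw_name:
--         return False
--
--     name = str(raw_name).strip().lower()
--     if not name:
--         return False
--
--     # Scan the name once: at every '.' boundary, look the ancestor package up
--     # in the frozenset; finally look up the whole name.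
--     for i, ch in enumerate(name):
--         if ch == "." and name[:i] in _ADWARE_LIBRARY_PREFIX_SET:
--             return True
--     return name in _ADWARE_LIBRARY_PREFIX_SET
-- ===== Notes on version B (the rewrite author's own statement) =====
-- stated objective: idiomatic
-- what changed: B stores the prefixes in a frozenset and makes one pass over the name, testing each dot-boundary ancestor (and the whole name) by set lookup, instead of scanning the fixed prefix tuple with == / startswith per prefix.
import Mathlib
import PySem

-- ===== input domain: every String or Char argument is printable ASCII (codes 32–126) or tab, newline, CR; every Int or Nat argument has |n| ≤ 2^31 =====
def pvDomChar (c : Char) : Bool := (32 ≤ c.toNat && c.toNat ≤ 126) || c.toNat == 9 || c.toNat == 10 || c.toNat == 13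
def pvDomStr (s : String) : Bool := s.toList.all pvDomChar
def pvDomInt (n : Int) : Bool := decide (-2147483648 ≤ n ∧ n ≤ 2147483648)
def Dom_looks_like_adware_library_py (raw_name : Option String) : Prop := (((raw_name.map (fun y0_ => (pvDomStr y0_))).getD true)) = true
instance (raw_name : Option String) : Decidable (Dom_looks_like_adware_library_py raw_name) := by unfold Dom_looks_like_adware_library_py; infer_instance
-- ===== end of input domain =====

-- B replaces A's per-prefix ==/startswith scan by one pass over the name that looks
-- every dot-boundary ancestor (and the whole name) up in a set (objective: idiomatic).

-- ===== PORT A =====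
-- the module constant _ADWARE_LIBRARY_PREFIXES (shared data, as in the Python module)
def pvAdwarePrefixes : List (List Char) :=
  ["admob".toList,
   "facebook_ads".toList,
   "com.google.android.gms.ads".toList,
   "com.google.ads".toList,
   "com.facebook.ads".toList,
   "com.unity3d.ads".toList,
   "com.applovin".toList,
   "com.mopub".toList,
   "com.ironsource".toList,
   "com.vungle".toList,
   "com.chartboost".toList,
   "com.inmobi".toList,
   "com.adcolony".toList,
   "com.tapjoy".toList,
   "com.startapp".toList,
   "com.bytedance.sdk.openadsdk".toList,
   "com.smaato".toList,
   "net.pubnative".toList]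

def looks_like_adware_library_py (raw_name : Option String) : Bool :=
  match raw_name with
  | none => false                                   -- 'if not raw_name' (None)
  | some s =>
    if s.toList.isEmpty then false                  -- 'if not raw_name' (empty string)
    else
      let name := PySem.Chars.lower (PySem.Chars.strip s.toList)
      if name.isEmpty then false
      else
        pvAdwarePrefixes.any (fun p =>
          name == p || PySem.Chars.startswith name (p ++ ['.']))

-- ===== PORT B =====
-- _ADWARE_LIBRARY_PREFIX_SET = frozenset(_ADWARE_LIBRARY_PREFIXES)
def pvAdwareSet : List (List Char) := PySem.Set.ofList pvAdwarePrefixes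

def looks_like_adware_library_py_alt (raw_name : Option String) : Bool :=
  match raw_name with
  | none => false
  | some s =>
    if s.toList.isEmpty then false
    else
      let name := PySem.Chars.lower (PySem.Chars.strip s.toList)
      if name.isEmpty then false
      else
        -- 'for i, ch in enumerate(name): if ch == "." and name[:i] in SET: return True'
        if (PySem.List.enumerate name 0).any (fun ic =>
              ic.2 == '.' && pvAdwareSet.contains (PySem.Chars.slice name none (some ic.1)))
        then true
        else pvAdwareSet.contains name              -- 'return name in SET'

-- ===== PRECONDITION & SPEC =====
def Spec_looks_like_adware_library_py (raw_name : Option String) (out : Bool) : Prop := out = looks_like_adware_library_py_alt raw_name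
instance (raw_name : Option String) (out : Bool) : Decidable (Spec_looks_like_adware_library_py raw_name out) := by unfold Spec_looks_like_adware_library_py; infer_instance

-- ===== CLAIM (what is proved, stated in full; the proofs are below) =====
def Claim_equal_looks_like_adware_library_py : Prop := ∀ (raw_name : Option String), Dom_looks_like_adware_library_py raw_name → Spec_looks_like_adware_library_py raw_name (looks_like_adware_library_py raw_name)

-- ===== LEMMAS AND PROOFS =====

-- 'p + "." is a prefix of name' ↔ 'name has a "." at index |p| = some dot boundary k with name[:k] = p'
lemma pv_prefix_dot_iff (p name : List Char) :
    (p ++ ['.']) <+: name ↔ ∃ k, ∃ _ : k < name.length, name[k] = '.' ∧ name.take k = p := by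
  constructor
  · rintro ⟨t, rfl⟩
    refine ⟨p.length, by simp, ?_, ?_⟩
    · simp [List.getElem_append_right]
    · rw [List.append_assoc, List.take_left']
      rfl
  · rintro ⟨k, hk, hdot, rfl⟩
    refine ⟨name.drop (k + 1), ?_⟩
    conv_rhs => rw [← List.take_append_drop k name]
    rw [List.append_assoc]
    congr 1
    rw [List.drop_eq_getElem_cons hk, hdot]
    rfl

-- core: on the normalized name, A's prefix-list scan equals B's one-pass boundary lookup
lemma pv_core (name : List Char) :
    pvAdwarePrefixes.any (fun p =>
        name == p || PySem.Chars.startswith name (p ++ ['.'])) =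
      ((PySem.List.enumerate name 0).any (fun ic =>
          ic.2 == '.' && pvAdwareSet.contains (PySem.Chars.slice name none (some ic.1)))
        || pvAdwareSet.contains name) := by
  rw [Bool.eq_iff_iff]
  simp only [List.any_eq_true, Bool.or_eq_true, Bool.and_eq_true, beq_iff_eq,
    PySem.Chars.startswith_iff, PySem.List.mem_enumerate_iff, List.contains_eq_mem,
    decide_eq_true_eq, pvAdwareSet, PySem.Set.mem_ofList, pv_prefix_dot_iff]
  constructor
  · rintro ⟨p, hp, h | ⟨k, hk, hdot, htake⟩⟩
    · exact Or.inr (h ▸ hp)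
    · refine Or.inl ⟨((k : Int), name[k]), ⟨k, hk, by simp⟩, hdot, ?_⟩
      simpa [PySem.List.slice_to_natCast, htake] using hp
  · rintro (⟨ic, ⟨k, hk, rfl⟩, hdot, hmem⟩ | hmem)
    · simp only [show ((0 : Int) + (k : Int)) = (k : Int) by ring,
        PySem.Chars.slice_eq_listSlice, PySem.List.slice_to_natCast] at hmem
      exact ⟨name.take k, hmem, Or.inr ⟨k, hk, hdot, rfl⟩⟩
    · exact ⟨name, hmem, Or.inl rfl⟩

-- ===== VERDICT (by name: the statement is the Claim_ definition above) =====
theorem looks_like_adware_library_py_spec : Claim_equal_looks_like_adware_library_py := by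
  intro raw_name _
  unfold Spec_looks_like_adware_library_py
  match raw_name with
  | none => rfl
  | some s =>
    simp only [looks_like_adware_library_py, looks_like_adware_library_py_alt]
    by_cases h1 : s.toList.isEmpty
    · simp [h1]
    · simp only [h1]
      by_cases h2 : (PySem.Chars.lower (PySem.Chars.strip s.toList)).isEmpty
      · simp [h2]
      · simp only [h2, pv_core]
        split <;> simp_all
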